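-- pv_equiv track=rewrite | github.com/djcotter/bioinformatics-utils | deduplicate_anchors.py | _generate_hash_table
-- ===== SOURCE A (Python) =====
-- def _generate_hash_table(anchors):
--     """
--     Generates a dict that collects the indices of all equivalent sequences given
--
--     :param anchors: list of str
--     :return: dict of {str, anchor: list of int, indices} recording indices of all sequence pileups
--     """
--     hash_table = {}
--     for i, anch in enumerate(anchors):
--         if anch in hash_table.keys():
--             prev_ids = hash_table[anch]
--         else:
--             prev_ids = []
--
--         prev_ids.append(i)
--
--         hash_table[anch] = prev_ids
--
--     return hash_table
-- ===== SOURCE B (Python) =====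
-- def _generate_hash_table(anchors):
--     """Dict comprehension over first-seen distinct anchors; per-key indices gathered by filtering enumerate."""
--     return {a: [i for i, x in enumerate(anchors) if x == a]
--             for a in dict.fromkeys(anchors)}
-- ===== Notes on version B (the rewrite author's own statement) =====
-- stated objective: simpler
-- what changed: A accumulates index lists in one pass over enumerate with a mutable hash table; B instead deduplicates the anchors (dict.fromkeys, first-seen order) and builds the result as a dict comprehension, computing each key's value independently by filtering enumerate for matching anchors.
import Mathlib
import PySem

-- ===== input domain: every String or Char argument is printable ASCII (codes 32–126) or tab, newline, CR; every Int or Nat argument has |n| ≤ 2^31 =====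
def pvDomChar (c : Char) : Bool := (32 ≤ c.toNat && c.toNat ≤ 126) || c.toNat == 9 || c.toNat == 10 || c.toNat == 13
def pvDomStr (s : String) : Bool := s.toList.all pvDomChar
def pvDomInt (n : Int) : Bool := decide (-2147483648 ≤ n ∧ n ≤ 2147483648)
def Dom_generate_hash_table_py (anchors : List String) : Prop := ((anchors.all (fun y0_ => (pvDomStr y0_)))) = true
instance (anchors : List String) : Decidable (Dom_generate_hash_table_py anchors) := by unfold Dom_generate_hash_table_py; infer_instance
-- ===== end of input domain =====

-- B replaces A's one-pass mutable-dict accumulation by a dict comprehension over the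
-- first-seen distinct anchors, filtering enumerate per key (objective: simpler; not faster).

-- ===== PORT A =====
def generate_hash_table_py (anchors : List String) : List (String × List Int) :=
  ((PySem.List.enumerate anchors 0).foldl
    (fun (d : PySem.Dict String (List Int)) (p : Int × String) =>
      let prev_ids := if d.contains p.2 then d.getD p.2 [] else []
      d.insert p.2 (prev_ids ++ [p.1]))
    PySem.Dict.empty).items

-- ===== PORT B =====
def generate_hash_table_py_alt (anchors : List String) : List (String × List Int) :=
  (PySem.List.dedup anchors).map (fun a =>
    (a, ((PySem.List.enumerate anchors 0).filter (fun p => p.2 == a)).map (fun p => p.1)))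

-- ===== PRECONDITION & SPEC =====
def Spec_generate_hash_table_py (anchors : List String) (out : List (String × List Int)) : Prop := out = generate_hash_table_py_alt anchors
instance (anchors : List String) (out : List (String × List Int)) : Decidable (Spec_generate_hash_table_py anchors out) := by unfold Spec_generate_hash_table_py; infer_instance

-- ===== CLAIM (what is proved, stated in full; the proofs are below) =====
def Claim_equal_generate_hash_table_py : Prop := ∀ (anchors : List String), Dom_generate_hash_table_py anchors → Spec_generate_hash_table_py anchors (generate_hash_table_py anchors)

-- ===== LEMMAS AND PROOFS =====

-- ===== VERDICT (by name: the statement is the Claim_ definition above) =====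
-- A's loop body (if-membership, append, reassign) is exactly Python's d[k] = d.get(k, []) + [i],
-- i.e. Dict.modify with default []
theorem astep_eq_modify :
    (fun (d : PySem.Dict String (List Int)) (p : Int × String) =>
      let prev_ids := if d.contains p.2 then d.getD p.2 [] else []
      d.insert p.2 (prev_ids ++ [p.1]))
  = fun (d : PySem.Dict String (List Int)) (p : Int × String) =>
      d.modify p.2 [] (fun x => x ++ [p.1]) := by
  funext d p
  by_cases h : d.contains p.2
  · simp only [h, if_true]
    rfl
  · have h' : d.contains p.2 = false := by simpa using h
    have e : d.getD p.2 [] = [] := PySem.Dict.getD_of_not_contains d [] h'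
    simp only [h', Bool.false_eq_true, if_false]
    show d.insert p.2 ([] ++ [p.1]) = d.insert p.2 (d.getD p.2 [] ++ [p.1])
    rw [e]

theorem generate_hash_table_py_spec : Claim_equal_generate_hash_table_py := by
  intro anchors _
  show generate_hash_table_py anchors = generate_hash_table_py_alt anchors
  unfold generate_hash_table_py generate_hash_table_py_alt
  rw [astep_eq_modify]
  -- view A's fold as the canonical (key, value)-pair grouping fold over swapped enumerate pairs
  have hswap : (PySem.List.enumerate anchors 0).foldl
      (fun (d : PySem.Dict String (List Int)) (p : Int × String) =>
        d.modify p.2 [] (fun x => x ++ [p.1])) PySem.Dict.empty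
    = ((PySem.List.enumerate anchors 0).map Prod.swap).foldl
      (fun (d : PySem.Dict String (List Int)) (q : String × Int) =>
        d.modify q.1 [] (fun x => x ++ [q.2])) PySem.Dict.empty := by
    rw [List.foldl_map]
    rfl
  rw [hswap]
  set lsw := (PySem.List.enumerate anchors 0).map Prod.swap with hl
  have hnd : ((lsw.foldl
      (fun (d : PySem.Dict String (List Int)) (q : String × Int) =>
        d.modify q.1 [] (fun x => x ++ [q.2])) PySem.Dict.empty)).keys.Nodup := by
    exact PySem.Dict.nodup_keys_foldl_modify_key lsw Prod.fst []
      (fun _ q => fun x => x ++ [q.2]) PySem.Dict.empty (by simp [PySem.Dict.keys_empty])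
  rw [PySem.Dict.items_eq_map_keys _ hnd []]
  have hkeys : (lsw.foldl
      (fun (d : PySem.Dict String (List Int)) (q : String × Int) =>
        d.modify q.1 [] (fun x => x ++ [q.2])) PySem.Dict.empty).keys
      = PySem.Set.ofList anchors := by
    rw [PySem.Dict.keys_foldl_modify_key lsw Prod.fst []
      (fun _ q => fun x => x ++ [q.2]) PySem.Dict.empty]
    have : lsw.map Prod.fst = anchors := by
      simp only [hl, List.map_map]
      exact PySem.List.map_snd_enumerate anchors 0
    rw [this]
    exact PySem.Set.update_empty anchors
  rw [hkeys]
  simp only [PySem.List.dedup_eq_ofList]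
  apply List.map_congr_left
  intro k _
  have hv := PySem.Dict.getD_foldl_modify_append lsw PySem.Dict.empty k
  rw [hv, PySem.Dict.getD_empty, List.nil_append, hl, List.filter_map, List.map_map]
  rfl
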